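-- pv_equiv track=rewrite | github.com/Arm-China/Compass_Apache_TVM | compass/tests/python/unittest/test_onnx_slice.py | infer_output_shape
-- ===== SOURCE A (Python) =====
-- import math
--
-- def infer_output_shape(input_shape, start, end, axes, steps):
--     if axes == "default":
--         axes = list(range(len(input_shape)))
--     if steps == "default":
--         steps = [1] * len(input_shape)
--
--     output_shape_dict = {}
--
--     for i, axis in enumerate(axes):
--         input_value = input_shape[axis]
--         axis = axis if axis >= 0 else len(input_shape) + axis
--         start_index = start[i]
--         end_index = end[i]
--         # If start or end is larger than the n (the number of elements in this dimension), it represents n.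
--         if start_index < -input_value:
--             start_index = -input_value
--         if start_index > input_value - 1:
--             start_index = input_value - 1
--         if end_index < -input_value:
--             end_index = -input_value
--         if end_index > input_value - 1:
--             end_index = input_value - 1
--         step = steps[i]
--         start_index = start_index if start_index >= 0 else input_value + start_index
--         end_index = end_index if end_index >= 0 else input_value + end_index  # exclusive
--         if step < 0:
--             step = -step
--             start_index, end_index = end_index, start_index
--         output_shape_dict[axis] = int(math.ceil((end_index - start_index) / step))
--
--     output_shape = []
--
--     for i, shape in enumerate(input_shape):
--         if i in output_shape_dict.keys():
--             output_shape.append(output_shape_dict[i])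
--         else:
--             output_shape.append(shape)
--     return output_shape
-- ===== SOURCE B (Python) =====
-- import math
--
-- def infer_output_shape(input_shape, start, end, axes, steps):
--     if axes == "default":
--         axes = list(range(len(input_shape)))
--     if steps == "default":
--         steps = [1] * len(input_shape)
--     n_dims = len(input_shape)
--
--     def sliced_size(i):
--         input_value = input_shape[axes[i]]
--         start_index = min(max(start[i], -input_value), input_value - 1)
--         end_index = min(max(end[i], -input_value), input_value - 1)
--         step = steps[i]
--         if start_index < 0:
--             start_index += input_value
--         if end_index < 0:
--             end_index += input_value
--         if step < 0:
--             start_index, end_index, step = end_index, start_index, -step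
--         return int(math.ceil((end_index - start_index) / step))
--
--     def size_of_dim(j):
--         # last matching slice wins, as when later writes overwrite earlier ones
--         for i in range(len(axes) - 1, -1, -1):
--             axis = axes[i]
--             if (axis if axis >= 0 else n_dims + axis) == j:
--                 return sliced_size(i)
--         return input_shape[j]
--
--     return [size_of_dim(j) for j in range(n_dims)]
-- ===== Notes on version B (the rewrite author's own statement) =====
-- stated objective: alternative
-- what changed: B inverts the traversal: instead of A's write-side pass (build a dict of sliced sizes over axes, then rebuild the shape in a second loop), B computes each output dimension independently by scanning axes backwards for the last slice that targets it (last write wins) and evaluating the sliced size lazily only for that match.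
import Mathlib
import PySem

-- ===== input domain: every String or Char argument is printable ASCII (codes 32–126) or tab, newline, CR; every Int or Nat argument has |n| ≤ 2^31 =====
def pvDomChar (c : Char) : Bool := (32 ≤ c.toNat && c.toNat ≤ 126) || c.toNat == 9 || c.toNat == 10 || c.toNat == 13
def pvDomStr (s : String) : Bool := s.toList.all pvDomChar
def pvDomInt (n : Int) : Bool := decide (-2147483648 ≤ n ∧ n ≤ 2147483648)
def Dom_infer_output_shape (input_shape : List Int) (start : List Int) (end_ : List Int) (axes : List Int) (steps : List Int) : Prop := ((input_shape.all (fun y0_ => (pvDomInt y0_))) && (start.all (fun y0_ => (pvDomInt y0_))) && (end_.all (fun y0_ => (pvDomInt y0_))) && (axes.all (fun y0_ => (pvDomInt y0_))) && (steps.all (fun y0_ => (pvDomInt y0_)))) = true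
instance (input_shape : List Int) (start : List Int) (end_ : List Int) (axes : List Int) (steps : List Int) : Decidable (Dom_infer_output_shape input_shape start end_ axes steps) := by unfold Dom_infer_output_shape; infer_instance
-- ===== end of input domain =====

-- B inverts A's traversal: instead of building a dict over axes and rebuilding the shape in a
-- second loop, B computes each output dimension by scanning axes backwards for the last slice
-- targeting it; equivalence of the RETURN values is proved (neither program mutates arguments).
-- In both ports `int(math.ceil((e - s) / step))` is ported as the exact ceiling division
-- -((-(e-s)) // step): on Dom (all |ints| ≤ 2^31) the numerator stays below 2^53 in absolute
-- value, where CPython's float division rounds too finely to move the ceiling.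

-- ===== PORT A =====
-- A's per-axis arithmetic (the sequence of clamping if-assignments, the negative-index shift,
-- the step-sign swap, and the ceiling division), as a helper.
-- (the `axes == "default"` / `steps == "default"` branches of the Python are untakeable
-- under the List Int typing and have no counterpart here)
def pvSliceA (n s0 e0 st0 : Int) : Int :=
  let s1 := if s0 < -n then -n else s0
  let s2 := if s1 > n - 1 then n - 1 else s1
  let e1 := if e0 < -n then -n else e0
  let e2 := if e1 > n - 1 then n - 1 else e1
  let s3 := if s2 ≥ 0 then s2 else n + s2
  let e3 := if e2 ≥ 0 then e2 else n + e2
  if st0 < 0 then -(PySem.Int.floordiv (-(s3 - e3)) (-st0))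
  else -(PySem.Int.floordiv (-(e3 - s3)) st0)

def infer_output_shape (input_shape : List Int) (start : List Int) (end_ : List Int) (axes : List Int) (steps : List Int) : List Int :=
  let d : PySem.Dict Int Int :=
    (PySem.List.enumerate axes 0).foldl (fun d p =>
      let n := PySem.List.pyGetD input_shape p.2 0
      let ax := if p.2 ≥ 0 then p.2 else (input_shape.length : Int) + p.2
      d.insert ax (pvSliceA n (PySem.List.pyGetD start p.1 0)
        (PySem.List.pyGetD end_ p.1 0) (PySem.List.pyGetD steps p.1 0)))
      PySem.Dict.empty
  (PySem.List.enumerate input_shape 0).foldl (fun out p =>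
    if d.contains p.1 then out ++ [d.getD p.1 0] else out ++ [p.2]) []

-- ===== PORT B =====
-- Source B's sliced_size(i): min/max clamping, negative shift by +=, swap on negative step, ceil.
def pvSliceB (n s0 e0 st0 : Int) : Int :=
  let s := min (max s0 (-n)) (n - 1)
  let e := min (max e0 (-n)) (n - 1)
  let s1 := if s < 0 then s + n else s
  let e1 := if e < 0 then e + n else e
  if st0 < 0 then -(PySem.Int.floordiv (-(s1 - e1)) (-st0))
  else -(PySem.Int.floordiv (-(e1 - s1)) st0)

def pvSlicedSize (input_shape start end_ axes steps : List Int) (i : Int) : Int :=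
  pvSliceB (PySem.List.pyGetD input_shape (PySem.List.pyGetD axes i 0) 0)
    (PySem.List.pyGetD start i 0) (PySem.List.pyGetD end_ i 0)
    (PySem.List.pyGetD steps i 0)

-- Source B's size_of_dim(j): scan axes backwards (range(len(axes)-1, -1, -1)) for the last slice
-- whose normalized axis is j; fall back to input_shape[j].
def pvSizeOfDim (input_shape start end_ axes steps : List Int) (j : Int) : Int :=
  match (PySem.List.pyRange ((axes.length : Int) - 1) (-1) (-1)).find?
      (fun i => (if PySem.List.pyGetD axes i 0 ≥ 0 then PySem.List.pyGetD axes i 0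
                 else (input_shape.length : Int) + PySem.List.pyGetD axes i 0) == j) with
  | some i => pvSlicedSize input_shape start end_ axes steps i
  | none => PySem.List.pyGetD input_shape j 0

def infer_output_shape_alt (input_shape : List Int) (start : List Int) (end_ : List Int) (axes : List Int) (steps : List Int) : List Int :=
  (PySem.List.pyRange 0 (input_shape.length : Int) 1).map
    (pvSizeOfDim input_shape start end_ axes steps)

-- ===== PRECONDITION & SPEC =====
-- Pre_ excludes exactly the inputs where the Python A raises: an axis outside the index range
-- of input_shape (IndexError), start/end/steps shorter than axes (IndexError), or a used step
-- equal to 0 (ZeroDivisionError).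
def Pre_infer_output_shape (input_shape : List Int) (start : List Int) (end_ : List Int) (axes : List Int) (steps : List Int) : Prop :=
  axes.length ≤ start.length ∧ axes.length ≤ end_.length ∧ axes.length ≤ steps.length ∧
  (∀ x ∈ steps.take axes.length, x ≠ 0) ∧
  (∀ a ∈ axes, PySem.Raise.InRange input_shape.length a)
instance (input_shape : List Int) (start : List Int) (end_ : List Int) (axes : List Int) (steps : List Int) : Decidable (Pre_infer_output_shape input_shape start end_ axes steps) := by unfold Pre_infer_output_shape; infer_instance

def pvWitness_infer_output_shape : List Int × List Int × List Int × List Int × List Int :=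
  ([4, 5], [0, 1], [3, -1], [0, 1], [1, 1])

def Spec_infer_output_shape (input_shape : List Int) (start : List Int) (end_ : List Int) (axes : List Int) (steps : List Int) (out : List Int) : Prop := out = infer_output_shape_alt input_shape start end_ axes steps
instance (input_shape : List Int) (start : List Int) (end_ : List Int) (axes : List Int) (steps : List Int) (out : List Int) : Decidable (Spec_infer_output_shape input_shape start end_ axes steps out) := by unfold Spec_infer_output_shape; infer_instance

-- ===== CLAIM =====
def Claim_equal_infer_output_shape : Prop := ∀ (input_shape : List Int) (start : List Int) (end_ : List Int) (axes : List Int) (steps : List Int), Dom_infer_output_shape input_shape start end_ axes steps → Pre_infer_output_shape input_shape start end_ axes steps → Spec_infer_output_shape input_shape start end_ axes steps (infer_output_shape input_shape start end_ axes steps)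

-- ===== LEMMAS AND PROOFS =====

-- The two per-axis arithmetics agree: min/max clamping is A's if-chain, += is A's n + s.
lemma pvSliceB_eq (n s0 e0 st0 : Int) : pvSliceB n s0 e0 st0 = pvSliceA n s0 e0 st0 := by
  have hc : ∀ x : Int, min (max x (-n)) (n - 1)
      = (if (if x < -n then -n else x) > n - 1 then n - 1 else (if x < -n then -n else x)) := by
    intro x; simp only [min_def, max_def]; split_ifs <;> omega
  have hs : ∀ x m : Int, (if x < 0 then x + m else x) = (if x ≥ 0 then x else m + x) := by
    intro x m; split_ifs <;> omega
  simp only [pvSliceB, pvSliceA, hc s0, hc e0, hs]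

-- A dict built by a left fold of inserts reads, at any key, the value of the LAST insert for
-- that key — i.e. the first match when searching the index list backwards.
lemma dict_fold_get? (key val : Int → Int) :
    ∀ (l : List Int) (d : PySem.Dict Int Int) (j : Int),
    (l.foldl (fun d i => d.insert (key i) (val i)) d).get? j
      = (match l.reverse.find? (fun i => key i == j) with
         | some i => some (val i)
         | none => d.get? j) := by
  intro l
  induction l with
  | nil => intro d j; simp
  | cons a l ih =>
      intro d j
      rw [List.foldl_cons, ih, List.reverse_cons, List.find?_append]
      cases h : l.reverse.find? (fun i => key i == j) with
      | some i => rfl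
      | none =>
          by_cases hk : key a == j
          · have he : key a = j := beq_iff_eq.mp hk
            subst he
            simp [List.find?]
          · have hne : j ≠ key a := by
              intro he; rw [he] at hk; simp at hk
            simp [PySem.Dict.get?_insert, hne, List.find?, hk]

-- A's rebuild loop, written as the map it appends.
lemma pv_render_eq_map (input_shape : List Int) (d : PySem.Dict Int Int) :
    (PySem.List.enumerate input_shape 0).foldl (fun out p =>
      if d.contains p.1 then out ++ [d.getD p.1 0] else out ++ [p.2]) [] =
    (PySem.List.enumerate input_shape 0).map
      (fun p => if d.contains p.1 then d.getD p.1 0 else p.2) := by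
  have h : ∀ (l : List (Int × Int)) (acc : List Int),
      l.foldl (fun out p => if d.contains p.1 then out ++ [d.getD p.1 0] else out ++ [p.2]) acc =
      acc ++ l.map (fun p => if d.contains p.1 then d.getD p.1 0 else p.2) := by
    intro l
    induction l with
    | nil => simp
    | cons p l ih => intro acc; simp only [List.foldl_cons, List.map_cons]
                     by_cases hc : d.contains p.1 <;> simp [hc, ih]
  simpa using h (PySem.List.enumerate input_shape 0) []

-- ===== VERDICT (by name: the statement is the Claim_ definition above) =====
theorem infer_output_shape_spec : Claim_equal_infer_output_shape := by
  intro input_shape start end_ axes steps _ _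
  unfold Spec_infer_output_shape
  unfold infer_output_shape infer_output_shape_alt
  rw [pv_render_eq_map]
  -- characterize A's dict
  set key : Int → Int := fun i =>
    if PySem.List.pyGetD axes i 0 ≥ 0 then PySem.List.pyGetD axes i 0
    else (input_shape.length : Int) + PySem.List.pyGetD axes i 0
  set val : Int → Int := fun i =>
    pvSliceA (PySem.List.pyGetD input_shape (PySem.List.pyGetD axes i 0) 0)
      (PySem.List.pyGetD start i 0) (PySem.List.pyGetD end_ i 0)
      (PySem.List.pyGetD steps i 0) with hval
  have hd : ∀ j : Int,
      ((PySem.List.enumerate axes 0).foldl (fun d p =>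
        d.insert (if p.2 ≥ 0 then p.2 else (input_shape.length : Int) + p.2)
          (pvSliceA (PySem.List.pyGetD input_shape p.2 0) (PySem.List.pyGetD start p.1 0)
            (PySem.List.pyGetD end_ p.1 0) (PySem.List.pyGetD steps p.1 0)))
        PySem.Dict.empty).get? j
      = (match ((PySem.List.pyRange 0 (axes.length : Int) 1).reverse.find?
            (fun i => key i == j)) with
         | some i => some (val i)
         | none => none) := by
    intro j
    rw [PySem.List.enumerate_eq_map_pyRange axes 0, List.foldl_map]
    have := dict_fold_get? key val (PySem.List.pyRange 0 (axes.length : Int) 1)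
      PySem.Dict.empty j
    simpa [PySem.Dict.get?_empty] using this
  apply List.ext_getElem?
  intro k
  by_cases hk : k < input_shape.length
  · have hk' : k < (PySem.List.enumerate input_shape 0).length := by
      rw [PySem.List.length_enumerate]; exact hk
    rw [PySem.List.getElem?_map_pyRange_zero (pvSizeOfDim input_shape start end_ axes steps) input_shape.length k hk]
    simp only [List.getElem?_map, PySem.List.getElem?_enumerate,
      List.getElem?_eq_getElem hk, Option.map_some, Option.some.injEq, zero_add]
    -- B's backwards range is the reverse of A's forward range
    have hrev : PySem.List.pyRange ((axes.length : Int) - 1) (-1) (-1)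
        = (PySem.List.pyRange 0 (axes.length : Int) 1).reverse := by
      rw [PySem.List.pyRange_neg_one_eq_reverse]
      norm_num
    unfold pvSizeOfDim
    rw [hrev]
    have hg : PySem.List.pyGetD input_shape (k : Int) 0 = input_shape[k] := by
      simp [PySem.List.pyGetD_natCast, List.getD, List.getElem?_eq_getElem hk]
    cases hf : (PySem.List.pyRange 0 (axes.length : Int) 1).reverse.find?
        (fun i => key i == (k : Int)) with
    | some i =>
        have hq := hd (k : Int); rw [hf] at hq
        rw [PySem.Dict.contains_eq_isSome_get?, hq, PySem.Dict.getD_eq_get?_getD, hq]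
        simp [pvSlicedSize, hval, pvSliceB_eq]
    | none =>
        have hq := hd (k : Int); rw [hf] at hq
        rw [PySem.Dict.contains_eq_isSome_get?, hq]
        simp [hg]
  · rw [List.getElem?_eq_none (by rw [List.length_map, PySem.List.length_enumerate]; omega),
      List.getElem?_eq_none (by
        rw [List.length_map, PySem.List.length_pyRange_one]; omega)]
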